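-- pv_equiv track=rewrite | github.com/uditmishra03/ScalerPractice | DSA/BinarySearch/addorNot.py | helper
-- ===== SOURCE A (Python) =====
-- def helper(nums, k, index):
-- 	# Initialize variables low, high, and res to store the
-- 	# lower index, higher index, and the result index
-- 	low = 0
-- 	high = index
-- 	res = index
--
-- 	# Perform binary search to find the maximum frequency
-- 	# of the current element by varying the element to its
-- 	# left
-- 	while low <= high:
-- 		mid = low + (high - low) // 2
--
-- 		# Calculate the sum of the elements from mid to index
-- 		s = sum(nums[mid:index+1])
--
-- 		# Check if the sum can be increased by at most k by
-- 		# replacing the elements from mid to index with the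
-- 		# current element nums[index]
-- 		if s + k >= (index - mid + 1) * nums[index]:
-- 			# If yes, update the result to mid and search
-- 			# for a better solution to the left of mid
-- 			res = mid
-- 			high = mid - 1
-- 		else:
-- 			# If no, search for a better solution to the
-- 			# right of mid
-- 			low = mid + 1
--
-- 	# Return the frequency of the current element
-- 	return index - res + 1
-- ===== SOURCE B (Python) =====
-- def helper(nums, k, index):
--     # Prefix sums computed once, then a recursive binary search that returns
--     # the accepted midpoint as an Optional instead of threading a running
--     # 'res' variable; each range sum is a prefix difference.
--     pref = [0]
--     s = 0
--     for v in nums[:index + 1]: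
--         s += v
--         pref.append(s)
--
--     def find(low, high):
--         if low > high:
--             return None
--         mid = (low + high) // 2
--         if pref[index + 1] - pref[mid] + k >= (index - mid + 1) * nums[index]:
--             r = find(low, mid - 1)
--             return mid if r is None else r
--         return find(mid + 1, high)
--
--     res = find(0, index)
--     if res is None:
--         res = index
--     return index - res + 1
-- ===== Notes on version B (the rewrite author's own statement) =====
-- stated objective: alternative
-- what changed: B precomputes a prefix-sum table once and runs the binary search as an Option-returning recursion taking range sums as prefix differences, instead of A's res-threading loop that re-sums the slice nums[mid:index+1] at every step.
import Mathlib
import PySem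

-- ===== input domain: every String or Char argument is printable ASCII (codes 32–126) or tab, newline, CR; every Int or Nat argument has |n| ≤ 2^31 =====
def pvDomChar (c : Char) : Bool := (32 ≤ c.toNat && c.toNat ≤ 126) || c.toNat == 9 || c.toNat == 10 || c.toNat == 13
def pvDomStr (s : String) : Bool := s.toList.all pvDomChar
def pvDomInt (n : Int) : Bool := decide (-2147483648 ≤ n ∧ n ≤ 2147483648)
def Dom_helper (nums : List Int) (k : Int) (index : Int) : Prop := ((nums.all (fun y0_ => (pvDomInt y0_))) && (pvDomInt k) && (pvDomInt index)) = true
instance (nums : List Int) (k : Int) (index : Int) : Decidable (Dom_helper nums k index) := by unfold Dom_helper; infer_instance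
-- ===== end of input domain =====

-- B precomputes prefix sums once and runs the binary search as an Option-returning
-- recursion taking range sums as prefix differences; the search decisions are
-- identical to A's, so the result is identical (alternative structure, same cost).

-- ===== PORT A =====
-- A's while-loop as structural recursion; the Nat fuel only makes the loop total
-- (it starts at (index+1).toNat + 1, more than the binary search can use)
def helperLoopA (nums : List Int) (k : Int) (index : Int) : Nat → Int → Int → Int → Int
  | 0, _, _, res => index - res + 1
  | fuel + 1, low, high, res =>
    if low ≤ high then
      let mid := low + PySem.Int.floordiv (high - low) 2
      let s := (PySem.List.slice nums (some mid) (some (index + 1))).sum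
      if s + k ≥ (index - mid + 1) * PySem.List.pyGetD nums index 0 then
        helperLoopA nums k index fuel low (mid - 1) mid
      else
        helperLoopA nums k index fuel (mid + 1) high res
    else
      index - res + 1

def helper (nums : List Int) (k : Int) (index : Int) : Int :=
  helperLoopA nums k index ((index + 1).toNat + 1) 0 index index

-- ===== PORT B =====
-- Source B's prefix-sum table: pref = [0]; s = 0; for v in nums[:index+1]: s += v; pref.append(s)
def prefB (xs : List Int) : List Int :=
  (xs.foldl (fun p v => (p.1 ++ [p.2 + v], p.2 + v)) (([0] : List Int), (0 : Int))).1

-- Source B's recursive 'find': returns the accepted midpoint as an Option (no res threading);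
-- the Nat fuel only makes the recursion total (Source B's recursion always terminates)
def findB (pref nums : List Int) (index k : Int) : Nat → Int → Int → Option Int
  | 0, _, _ => none
  | fuel + 1, low, high =>
    if low > high then none
    else
      let mid := PySem.Int.floordiv (low + high) 2
      if PySem.List.pyGetD pref (index + 1) 0 - PySem.List.pyGetD pref mid 0 + k
           ≥ (index - mid + 1) * PySem.List.pyGetD nums index 0 then
        match findB pref nums index k fuel low (mid - 1) with
        | none => some mid
        | some r => some r
      else findB pref nums index k fuel (mid + 1) high

def helper_alt (nums : List Int) (k : Int) (index : Int) : Int :=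
  let pref := prefB (PySem.List.slice nums none (some (index + 1)))
  let res := (findB pref nums index k ((index + 1).toNat + 1) 0 index).getD index
  index - res + 1

-- ===== PRECONDITION & SPEC =====
-- Pre_ excludes exactly the inputs where Python A raises IndexError (index ≥ len(nums);
-- the loop then evaluates nums[index]); for index < 0 the loop never runs and A returns 1.
def Pre_helper (nums : List Int) (k : Int) (index : Int) : Prop :=
  index < (nums.length : Int)
instance (nums : List Int) (k : Int) (index : Int) : Decidable (Pre_helper nums k index) := by
  unfold Pre_helper; infer_instance

def pvWitness_helper : List Int × Int × Int := ([1, 2, 1, 1], 2, 3)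

def Spec_helper (nums : List Int) (k : Int) (index : Int) (out : Int) : Prop := out = helper_alt nums k index
instance (nums : List Int) (k : Int) (index : Int) (out : Int) : Decidable (Spec_helper nums k index out) := by unfold Spec_helper; infer_instance

-- ===== CLAIM (what is proved, stated in full; the proofs are below) =====
def Claim_equal_helper : Prop := ∀ (nums : List Int) (k : Int) (index : Int), Dom_helper nums k index → Pre_helper nums k index → Spec_helper nums k index (helper nums k index)

-- ===== LEMMAS AND PROOFS =====

-- spine of prefB: the prefix-sum entries after the initial 0
def prefFrom (s : Int) : List Int → List Int
  | [] => []
  | v :: t => (s + v) :: prefFrom (s + v) t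

theorem foldl_prefB (ys : List Int) : ∀ (acc : List Int) (s : Int),
    (ys.foldl (fun p v => (p.1 ++ [p.2 + v], p.2 + v)) (acc, s)).1 = acc ++ prefFrom s ys := by
  induction ys with
  | nil => intro acc s; simp [prefFrom]
  | cons v t ih => intro acc s; simp [List.foldl, prefFrom, ih]

theorem prefFrom_getD (xs : List Int) : ∀ (s : Int) (i : Nat), i < xs.length →
    (prefFrom s xs).getD i 0 = s + (xs.take (i + 1)).sum := by
  induction xs with
  | nil => intro s i h; simp at h
  | cons v t ih =>
    intro s i h
    cases i with
    | zero => simp [prefFrom]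
    | succ j =>
      simp only [prefFrom, List.getD_cons_succ, List.take_succ_cons, List.sum_cons]
      rw [ih (s + v) j (by simpa using h)]
      ring

theorem prefB_getD (xs : List Int) (i : Nat) (h : i ≤ xs.length) :
    (prefB xs).getD i 0 = (xs.take i).sum := by
  unfold prefB
  rw [foldl_prefB]
  cases i with
  | zero => simp
  | succ j =>
    have : ([(0 : Int)] ++ prefFrom 0 xs).getD (j + 1) 0 = (prefFrom 0 xs).getD j 0 := by
      simp
    rw [this, prefFrom_getD xs 0 j (by omega)]
    simp

-- the slice sum equals the difference of prefix sums over nums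
theorem slice_sum_eq (nums : List Int) (a b : Int) (h0 : 0 ≤ a) (hab : a ≤ b) :
    (PySem.List.slice nums (some a) (some b)).sum
      = (nums.take b.toNat).sum - (nums.take a.toNat).sum := by
  obtain ⟨n, hn⟩ : ∃ n, b.toNat = a.toNat + n := ⟨b.toNat - a.toNat, by omega⟩
  have hsplit : nums.take b.toNat = nums.take a.toNat ++ (nums.drop a.toNat).take (b.toNat - a.toNat) := by
    rw [hn, List.take_add]
    congr 2
    omega
  rw [ha', hb', PySem.List.slice_natCast]
  simp only [Int.toNat_natCast]
  rw [hsplit, List.sum_append]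
  ring
where
  ha' : a = ((a.toNat : Nat) : Int) := by omega
  hb' : b = ((b.toNat : Nat) : Int) := by omega

-- B's prefix difference is exactly A's slice sum, for 0 ≤ mid ≤ index < len nums
theorem pref_diff_eq (nums : List Int) (index mid : Int)
    (hI : 0 ≤ index) (hlen : index < (nums.length : Int)) (hm0 : 0 ≤ mid) (hmi : mid ≤ index) :
    PySem.List.pyGetD (prefB (PySem.List.slice nums none (some (index + 1)))) (index + 1) 0
      - PySem.List.pyGetD (prefB (PySem.List.slice nums none (some (index + 1)))) mid 0
      = (PySem.List.slice nums (some mid) (some (index + 1))).sum := by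
  set xs := PySem.List.slice nums none (some (index + 1)) with hxs
  have h1 : (index + 1) = (((index + 1).toNat : Nat) : Int) := by omega
  have hxs' : xs = nums.take (index + 1).toNat := by
    rw [hxs, h1, PySem.List.slice_to_natCast]; simp; omega
  have hlenxs : xs.length = (index + 1).toNat := by
    rw [hxs']; simp; omega
  have h2 : mid = ((mid.toNat : Nat) : Int) := by omega
  rw [h1, h2, PySem.List.pyGetD_natCast, PySem.List.pyGetD_natCast,
      prefB_getD xs _ (by omega), prefB_getD xs _ (by omega)]
  have ht1 : xs.take (index + 1).toNat = nums.take (index + 1).toNat := by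
    rw [hxs', List.take_take]; congr 1; omega
  have ht2 : xs.take mid.toNat = nums.take mid.toNat := by
    rw [hxs', List.take_take]; congr 1; omega
  rw [ht1, ht2, ← h2, ← h1, slice_sum_eq nums mid (index + 1) hm0 (by omega)]

-- A's loop equals Source B's recursion: the loop's res is the default of the Option
theorem loop_corr (nums : List Int) (k index : Int)
    (hI : 0 ≤ index) (hlen : index < (nums.length : Int)) :
    ∀ (fuel : Nat) (low high res : Int), 0 ≤ low → high ≤ index →
      helperLoopA nums k index fuel low high res
        = index - (findB (prefB (PySem.List.slice nums none (some (index + 1)))) nums index k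
            fuel low high).getD res + 1 := by
  intro fuel
  induction fuel with
  | zero => intro low high res _ _; simp [helperLoopA, findB]
  | succ fuel ih =>
    intro low high res hl hh
    rw [helperLoopA, findB]
    by_cases hlh : low ≤ high
    · simp only [if_pos hlh, if_neg (not_lt.mpr hlh)]
      have hfdA := PySem.Int.floordiv_eq_ediv_of_pos (a := high - low) (b := 2) (by norm_num)
      have hfdB := PySem.Int.floordiv_eq_ediv_of_pos (a := low + high) (b := 2) (by norm_num)
      have hmid : low + PySem.Int.floordiv (high - low) 2 = PySem.Int.floordiv (low + high) 2 := by
        omega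
      rw [hmid]
      set mid := PySem.Int.floordiv (low + high) 2 with hm
      have hmb : 0 ≤ mid ∧ low ≤ mid ∧ mid ≤ high := by omega
      rw [pref_diff_eq nums index mid hI hlen hmb.1 (by omega)]
      by_cases hc : (PySem.List.slice nums (some mid) (some (index + 1))).sum + k
          ≥ (index - mid + 1) * PySem.List.pyGetD nums index 0
      · rw [if_pos hc, if_pos hc]
        rw [ih low (mid - 1) mid hl (by omega)]
        cases hfind : findB (prefB (PySem.List.slice nums none (some (index + 1)))) nums index k
            fuel low (mid - 1) with
        | none => simp
        | some r => simp
      · rw [if_neg hc, if_neg hc]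
        exact ih (mid + 1) high res (by omega) hh
    · simp only [if_neg hlh, if_pos (not_le.mp hlh), Option.getD_none]

-- ===== VERDICT (by name: the statement is the Claim_ definition above) =====
theorem helper_spec : Claim_equal_helper := by
  intro nums k index _hdom hpre
  unfold Spec_helper helper helper_alt
  by_cases hi : 0 ≤ index
  · exact loop_corr nums k index hi hpre ((index + 1).toNat + 1) 0 index index le_rfl le_rfl
  · have h1 : (index + 1).toNat + 1 = 1 := by omega
    have h : ¬ (0 : Int) ≤ index := hi
    rw [h1, helperLoopA]
    simp [h, findB, not_le.mp h]
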